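-- pv_equiv track=rewrite | github.com/gplantard/GeneraTex | Tools.py | getValideName
-- ===== SOURCE A (Python) =====
-- def getValideName(defaultName, usedNameList, PossibleName = None):
--     if defaultName in usedNameList:
--         # On recherche dans la liste proposé si il y a une possibilité
--         if PossibleName != None:
--             for n in PossibleName:
--                 if n not in usedNameList:
--                     return n
--         # On rajoute un nombre en indice
--         index = 1
--         while defaultName+"_"+str(index) in usedNameList:
--             index += 1
--         return defaultName+"_"+str(index)
--     return defaultName
-- ===== SOURCE B (Python) =====
-- def _suffixIndex(prefix, name):
--     # Parse name as prefix + canonical decimal; return its value, else None.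
--     if not name.startswith(prefix):
--         return None
--     rest = name[len(prefix):]
--     v = 0
--     for ch in rest:
--         v = 10 * v + (ord(ch) - 48)
--     return v if str(v) == rest else None
--
--
-- def getValideName(defaultName, usedNameList, PossibleName=None):
--     used = set(usedNameList)
--     if defaultName not in used:
--         return defaultName
--     if PossibleName is not None:
--         n = next((n for n in PossibleName if n not in used), None)
--         if n is not None:
--             return n
--     # Instead of probing defaultName_1, defaultName_2, ... one by one, parse the
--     # suffix index out of every used name and return the least positive index
--     # not taken (computed by one scan over the sorted indices).
--     prefix = defaultName + "_"
--     taken = [v for v in (_suffixIndex(prefix, u) for u in usedNameList) if v is not None]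
--     i = 1
--     for k in sorted(taken):
--         if k == i:
--             i += 1
--     return prefix + str(i)
-- ===== Notes on version B (the rewrite author's own statement) =====
-- stated objective: alternative
-- what changed: Replaces A's probe-one-candidate-at-a-time while loop (defaultName_1, defaultName_2, ... each tested against the list) by the inverse computation: parse the numeric suffix out of every used name once, then return the least free index by a single scan over the sorted parsed indices; name-membership tests go through a set built once.
import Mathlib
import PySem

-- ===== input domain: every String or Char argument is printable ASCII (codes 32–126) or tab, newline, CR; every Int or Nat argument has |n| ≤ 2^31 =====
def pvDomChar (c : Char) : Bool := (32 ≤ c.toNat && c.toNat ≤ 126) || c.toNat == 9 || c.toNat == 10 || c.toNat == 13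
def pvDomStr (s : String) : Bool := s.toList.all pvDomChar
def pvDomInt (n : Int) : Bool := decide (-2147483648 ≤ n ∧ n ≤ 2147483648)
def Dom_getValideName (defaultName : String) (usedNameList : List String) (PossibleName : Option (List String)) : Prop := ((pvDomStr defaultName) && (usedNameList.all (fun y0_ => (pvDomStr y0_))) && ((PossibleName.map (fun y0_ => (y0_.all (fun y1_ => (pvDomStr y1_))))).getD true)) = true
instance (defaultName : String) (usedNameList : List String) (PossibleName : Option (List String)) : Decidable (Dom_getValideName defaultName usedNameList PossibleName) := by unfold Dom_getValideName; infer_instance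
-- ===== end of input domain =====

-- B replaces A's probe-one-index-at-a-time while loop by a different algorithm: it
-- parses the numeric suffix out of every used name and returns the least free index
-- by a single scan over the sorted parsed indices (and checks names against a set).

-- ===== PORT A =====
-- A's 'while defaultName+"_"+str(index) in usedNameList: index += 1', run with fuel;
-- fuel = usedNameList.length + 1 always suffices (pigeonhole, proved below); the
-- fuel-0 branch returns the current candidate.
def pvA_while (defaultName : String) (usedNameList : List String) : Int → Nat → String
  | index, 0 => defaultName ++ "_" ++ PySem.Int.toStr index
  | index, fuel + 1 =>
    if usedNameList.contains (defaultName ++ "_" ++ PySem.Int.toStr index) then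
      pvA_while defaultName usedNameList (index + 1) fuel
    else
      defaultName ++ "_" ++ PySem.Int.toStr index

def getValideName (defaultName : String) (usedNameList : List String) (PossibleName : Option (List String)) : String :=
  if usedNameList.contains defaultName then
    match PossibleName with
    | some lst =>
      -- 'for n in PossibleName: if n not in usedNameList: return n' = first hit
      match lst.find? (fun n => !usedNameList.contains n) with
      | some n => n
      | none => pvA_while defaultName usedNameList 1 (usedNameList.length + 1)
    | none => pvA_while defaultName usedNameList 1 (usedNameList.length + 1)
  else
    defaultName

-- ===== PORT B =====
-- the hand-written digit fold of Source B: v = 10*v + (ord(ch) - 48)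
def pvDigitFold (rest : List Char) : Int :=
  rest.foldl (fun v ch => 10 * v + ((ch.toNat : Int) - 48)) 0

-- Source B's _suffixIndex; name[len(prefix):] with a nonnegative start is List.drop (exact)
def pvSuffixIndex (p : String) (name : String) : Option Int :=
  if PySem.Chars.startswith name.toList p.toList then
    let rest := name.toList.drop p.toList.length
    let v := pvDigitFold rest
    if PySem.Int.toChars v = rest then some v else none
  else none

def getValideName_alt (defaultName : String) (usedNameList : List String) (PossibleName : Option (List String)) : String :=
  let used := PySem.Set.ofList usedNameList
  if !(PySem.Set.contains used defaultName) then defaultName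
  else
    let hit := match PossibleName with
      | some lst => lst.find? (fun n => !(PySem.Set.contains used n))
      | none => none
    match hit with
    | some n => n
    | none =>
      let pre := defaultName ++ "_"
      let taken := usedNameList.filterMap (pvSuffixIndex pre)
      let i := (PySem.List.sorted taken (fun x => x) false).foldl
          (fun i k => if k = i then i + 1 else i) 1
      pre ++ PySem.Int.toStr i

-- ===== PRECONDITION & SPEC =====
def Spec_getValideName (defaultName : String) (usedNameList : List String) (PossibleName : Option (List String)) (out : String) : Prop := out = getValideName_alt defaultName usedNameList PossibleName
instance (defaultName : String) (usedNameList : List String) (PossibleName : Option (List String)) (out : String) : Decidable (Spec_getValideName defaultName usedNameList PossibleName out) := by unfold Spec_getValideName; infer_instance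

-- ===== CLAIM =====
def Claim_equal_getValideName : Prop := ∀ (defaultName : String) (usedNameList : List String) (PossibleName : Option (List String)), Dom_getValideName defaultName usedNameList PossibleName → Spec_getValideName defaultName usedNameList PossibleName (getValideName defaultName usedNameList PossibleName)

-- ===== LEMMAS AND PROOFS =====

-- membership in the set built from usedNameList is membership in usedNameList
lemma setContains_ofList (xs : List String) (c : String) :
    PySem.Set.contains (PySem.Set.ofList xs) c = xs.contains c := by
  by_cases h : c ∈ xs
  · simp [PySem.Set.mem_ofList, h]
  · simp only [List.contains_eq_mem, h, decide_false]
    rw [← Bool.not_eq_true]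
    intro hc
    exact h ((PySem.Set.mem_ofList xs c).mp ((PySem.Set.contains_iff _ _).mp hc))

lemma digitFold_append (a b : List Char) :
    pvDigitFold (a ++ b) = b.foldl (fun v ch => 10 * v + ((ch.toNat : Int) - 48)) (pvDigitFold a) := by
  simp [pvDigitFold, List.foldl_append]

lemma digitFold_toDigits (m : Nat) :
    pvDigitFold (Nat.toDigits 10 m) = (m : Int) := by
  induction m using Nat.strong_induction_on with
  | _ m ih =>
    rw [Nat.toDigits_eq_if (by norm_num)]
    by_cases h : m < 10
    · rw [if_pos h]
      interval_cases m <;> decide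
    · rw [if_neg h]
      rw [digitFold_append, List.foldl_cons, List.foldl_nil,
        ih (m / 10) (by omega)]
      have h2 : m % 10 < 10 := Nat.mod_lt _ (by norm_num)
      have h3 : ((Nat.digitChar (m % 10)).toNat : Int) = (m % 10 : Nat) + 48 := by
        interval_cases h4 : (m % 10) <;> simp_all <;> decide
      rw [h3]
      have := Nat.div_add_mod m 10
      push_cast
      omega

lemma digitFold_toChars (i : Int) (h : 0 ≤ i) :
    pvDigitFold (PySem.Int.toChars i) = i := by
  rw [PySem.Int.toChars, if_neg (by omega), digitFold_toDigits]
  omega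

lemma suffixIndex_eq_some_of (p : String) (i : Int) (u : String)
    (h : u.toList = p.toList ++ PySem.Int.toChars i) (hi : 0 ≤ i) :
    pvSuffixIndex p u = some i := by
  rw [pvSuffixIndex, if_pos (by rw [PySem.Chars.startswith_iff, h]; exact List.prefix_append _ _)]
  simp only [h, List.drop_left, digitFold_toChars i hi, if_true]

lemma toList_of_suffixIndex_eq_some (p : String) (u : String) (i : Int)
    (h : pvSuffixIndex p u = some i) :
    u.toList = p.toList ++ PySem.Int.toChars i := by
  rw [pvSuffixIndex] at h
  by_cases hs : PySem.Chars.startswith u.toList p.toList = true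
  · rw [if_pos hs] at h
    simp only at h
    split at h
    · rename_i hc
      obtain ⟨t, ht⟩ := (PySem.Chars.startswith_iff _ _).mp hs
      cases h
      rw [← ht, List.drop_left] at hc
      rw [← ht, List.drop_left, hc]
    · exact absurd h (by simp)
  · rw [if_neg hs] at h; exact absurd h (by simp)

lemma mexFold_const (l : List Int) (i0 : Int) (h : ∀ x ∈ l, i0 < x) :
    l.foldl (fun i k => if k = i then i + 1 else i) i0 = i0 := by
  induction l with
  | nil => rfl
  | cons k t ih =>
    rw [List.foldl_cons, if_neg (by have := h k (by simp); omega)]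
    exact ih (fun x hx => h x (by simp [hx]))

lemma mexFold_spec (l : List Int) (hp : l.Pairwise (· ≤ ·)) (i0 : Int) :
    i0 ≤ l.foldl (fun i k => if k = i then i + 1 else i) i0 ∧
    l.foldl (fun i k => if k = i then i + 1 else i) i0 ∉ l ∧
    (∀ j, i0 ≤ j → j < l.foldl (fun i k => if k = i then i + 1 else i) i0 → j ∈ l) ∧
    l.foldl (fun i k => if k = i then i + 1 else i) i0 ≤ i0 + l.length := by
  induction l generalizing i0 with
  | nil => simp
  | cons k t ih =>
    rw [List.pairwise_cons] at hp
    obtain ⟨hk, hpt⟩ := hp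
    rw [List.foldl_cons]
    by_cases he : k = i0
    · rw [if_pos he]
      obtain ⟨h1, h2, h3, h4⟩ := ih hpt (i0 + 1)
      refine ⟨by omega, ?_, ?_, by simp; omega⟩
      · intro hmem
        rcases List.mem_cons.mp hmem with h | h
        · omega
        · exact h2 h
      · intro j hj1 hj2
        by_cases hj : j = i0
        · simp [hj, he]
        · exact List.mem_cons_of_mem _ (h3 j (by omega) hj2)
    · rw [if_neg he]
      by_cases hlt : k < i0
      · obtain ⟨h1, h2, h3, h4⟩ := ih hpt i0
        refine ⟨h1, ?_, ?_, by simp; omega⟩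
        · intro hmem
          rcases List.mem_cons.mp hmem with h | h
          · omega
          · exact h2 h
        · intro j hj1 hj2
          exact List.mem_cons_of_mem _ (h3 j hj1 hj2)
      · have hgt : i0 < k := by omega
        have hconst : t.foldl (fun i k => if k = i then i + 1 else i) i0 = i0 :=
          mexFold_const t i0 (fun x hx => lt_of_lt_of_le hgt (hk x hx))
        rw [hconst]
        refine ⟨le_refl _, ?_, by omega, by simp; omega⟩
        intro hmem
        rcases List.mem_cons.mp hmem with h | h
        · omega
        · have := hk _ h; omega

lemma pvA_while_eq (d : String) (xs : List String) (m : Int) :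
    ∀ (fuel : Nat) (index : Int),
      index ≤ m → m ≤ index + fuel →
      (∀ j, index ≤ j → j < m → xs.contains (d ++ "_" ++ PySem.Int.toStr j) = true) →
      xs.contains (d ++ "_" ++ PySem.Int.toStr m) = false →
      pvA_while d xs index fuel = d ++ "_" ++ PySem.Int.toStr m := by
  intro fuel
  induction fuel with
  | zero =>
    intro index h1 h2 h3 h4
    have : index = m := by omega
    simp [pvA_while, this]
  | succ n ih =>
    intro index h1 h2 h3 h4
    rw [pvA_while]
    by_cases he : index = m
    · rw [he, if_neg (by rw [h4]; simp)]
    · rw [if_pos (h3 index (le_refl _) (by omega))]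
      exact ih (index + 1) (by omega) (by push_cast at h2 ⊢; omega)
        (fun j hj1 hj2 => h3 j (by omega) hj2) h4


-- the bridge: A's probe 'defaultName_j in usedNameList' is 'j ∈ taken' (j ≥ 1)
lemma probe_iff_mem_taken (d : String) (xs : List String) (j : Int) (hj : 1 ≤ j) :
    xs.contains (d ++ "_" ++ PySem.Int.toStr j) = true ↔
      j ∈ xs.filterMap (pvSuffixIndex (d ++ "_")) := by
  have hlist : (d ++ "_" ++ PySem.Int.toStr j).toList
      = (d ++ "_").toList ++ PySem.Int.toChars j := by
    rw [String.toList_append, PySem.Int.toList_toStr]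
  constructor
  · intro h
    rw [List.mem_filterMap]
    exact ⟨d ++ "_" ++ PySem.Int.toStr j, List.contains_iff_mem.mp h,
      suffixIndex_eq_some_of _ _ _ hlist (by omega)⟩
  · intro h
    rw [List.mem_filterMap] at h
    obtain ⟨u, hu, hp⟩ := h
    have := toList_of_suffixIndex_eq_some _ _ _ hp
    rw [← hlist] at this
    rw [List.contains_iff_mem, ← String.toList_inj.mp this]
    exact hu

theorem getValideName_spec : Claim_equal_getValideName := by
  intro d xs pn _
  unfold Spec_getValideName getValideName getValideName_alt
  simp only [setContains_ofList]
  by_cases hd : xs.contains d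
  · rw [if_pos hd, hd]
    simp only [Bool.not_true, Bool.false_eq_true, if_false]
    -- the suffix-search branch, shared by both 'pn = none' and 'no free possible name'
    have hsuffix : pvA_while d xs 1 (xs.length + 1) =
        (d ++ "_") ++ PySem.Int.toStr
          ((PySem.List.sorted (xs.filterMap (pvSuffixIndex (d ++ "_"))) (fun x => x) false).foldl
            (fun i k => if k = i then i + 1 else i) 1) := by
      set taken := xs.filterMap (pvSuffixIndex (d ++ "_")) with htaken
      set l := PySem.List.sorted taken (fun x => x) false with hl
      obtain ⟨h1, h2, h3, h4⟩ := mexFold_spec l (PySem.List.sorted_pairwise taken (fun x => x)) 1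
      set m := l.foldl (fun i k => if k = i then i + 1 else i) 1 with hm
      have hlen : l.length ≤ xs.length := by
        rw [hl, PySem.List.length_sorted]
        exact List.length_filterMap_le _ _
      apply pvA_while_eq d xs m (xs.length + 1) 1 h1 (by push_cast; omega)
      · intro j hj1 hj2
        exact (probe_iff_mem_taken d xs j hj1).mpr
          ((PySem.List.mem_sorted taken (fun x => x) false j).mp (h3 j hj1 hj2))
      · by_contra hc
        rw [Bool.not_eq_false] at hc
        exact h2 ((PySem.List.mem_sorted taken (fun x => x) false m).mpr
          ((probe_iff_mem_taken d xs m h1).mp hc))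
    cases pn with
    | none => simpa using hsuffix
    | some lst =>
      simp only
      cases hfind : lst.find? (fun n => !xs.contains n) with
      | some n => simp
      | none => simpa [hfind] using hsuffix
  · rw [if_neg hd]
    rw [Bool.not_eq_true] at hd
    rw [hd]
    simp
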